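-- pv_equiv track=rewrite | github.com/FRA0420/ITS-Python | Lezione08/ClassiAstratte/RECUPERO/es_paroleuniche.py | count_unique_words
-- ===== SOURCE A (Python) =====
-- import string
--
-- def count_unique_words(text):
--     # Suddividi il testo sugli spazi bianchi
--     tokens = text.split()
--
--     # Dizionario per il conteggio delle parole
--     word_count = {}
--
--     for token in tokens:
--         # Converti in minuscolo
--         token = token.lower()
--         # Rimuovi punteggiatura iniziale e finale
--         token = token.strip(string.punctuation)
--         # Ignora i token vuoti
--         if token:
--             if token in word_count:
--                 word_count[token] += 1
--             else:
--                 word_count[token] = 1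
--
--     return word_count
-- ===== SOURCE B (Python) =====
-- import string
--
-- def count_unique_words(text):
--     # phase 1: the full list of normalized non-empty tokens
--     words = [t for t in (tok.lower().strip(string.punctuation) for tok in text.split()) if t]
--     # phase 2: partition counting - peel off the first remaining word, count it as the
--     # number of occurrences removed by filtering it out, continue on the remainder
--     counts = {}
--     while words:
--         w = words[0]
--         rest = [x for x in words if x != w]
--         counts[w] = len(words) - len(rest)
--         words = rest
--     return counts
-- ===== Notes on version B (the rewrite author's own statement) =====
-- stated objective: alternative
-- what changed: Replaces A's single-pass incremental dict counting with a two-phase partition algorithm: first build the full list of normalized tokens, then repeatedly take the first remaining word, obtain its count as the length drop after filtering out all its occurrences, and recurse on the remainder; no per-token dict lookups or increments remain.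
import Mathlib
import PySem

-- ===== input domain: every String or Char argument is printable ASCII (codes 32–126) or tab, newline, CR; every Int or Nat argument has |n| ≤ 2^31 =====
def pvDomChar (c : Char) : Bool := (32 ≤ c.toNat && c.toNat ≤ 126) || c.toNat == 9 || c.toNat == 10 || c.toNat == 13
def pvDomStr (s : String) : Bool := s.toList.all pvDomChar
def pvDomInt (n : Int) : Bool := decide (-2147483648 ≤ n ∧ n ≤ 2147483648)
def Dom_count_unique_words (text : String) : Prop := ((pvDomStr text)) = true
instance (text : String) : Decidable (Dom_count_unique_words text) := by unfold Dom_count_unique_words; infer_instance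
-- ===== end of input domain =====

-- B replaces A's single-pass incremental dict counting by a partition algorithm: build the
-- normalized word list once, then repeatedly count the first remaining word by the length
-- drop after filtering out its occurrences; stated as 'alternative' (not faster).

-- string.punctuation
def pvPunct : String := "!\"#$%&'()*+,-./:;<=>?@[\\]^_`{|}~"

-- ===== PORT A =====
def count_unique_words (text : String) : List (String × Int) :=
  let tokens := PySem.Str.split₀ text
  (tokens.foldl (fun (wc : PySem.Dict String Int) token =>
      let t := PySem.Str.stripChars (PySem.Str.lower token) pvPunct
      if t ≠ "" then
        if wc.contains t then wc.insert t (wc.getD t 0 + 1)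
        else wc.insert t 1
      else wc) PySem.Dict.empty).items

-- ===== PORT B =====
-- the while-loop of Source B: peel off words[0], count it as the length difference
def pvGroup : List String → List (String × Int)
  | [] => []
  | w :: ws =>
    (w, ((ws.length + 1 : Int) - (ws.filter (fun x => x ≠ w)).length))
      :: pvGroup (ws.filter (fun x => x ≠ w))
termination_by ws => ws.length
decreasing_by
  have h := List.length_filter_le (fun (x : Subtype (Membership.mem ws)) => !decide (↑x = w)) ws.attach
  simpa using le_trans h (Nat.le_of_eq List.length_attach)

def count_unique_words_alt (text : String) : List (String × Int) :=
  let words := ((PySem.Str.split₀ text).map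
      (fun tok => PySem.Str.stripChars (PySem.Str.lower tok) pvPunct)).filter (fun t => t ≠ "")
  pvGroup words

-- ===== PRECONDITION & SPEC =====
def Spec_count_unique_words (text : String) (out : List (String × Int)) : Prop := out = count_unique_words_alt text
instance (text : String) (out : List (String × Int)) : Decidable (Spec_count_unique_words text out) := by unfold Spec_count_unique_words; infer_instance

-- ===== CLAIM (what is proved, stated in full; the proofs are below) =====
def Claim_equal_count_unique_words : Prop := ∀ (text : String), Dom_count_unique_words text → Spec_count_unique_words text (count_unique_words text)

-- ===== LEMMAS AND PROOFS =====

-- A's branch collapses to the uniform insert-getD-add step.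
theorem pvStep_eq (wc : PySem.Dict String Int) (t : String) :
    (if wc.contains t then wc.insert t (wc.getD t 0 + 1) else wc.insert t 1)
      = wc.insert t (wc.getD t 0 + 1) := by
  by_cases h : wc.contains t = true
  · simp [h]
  · simp only [Bool.not_eq_true] at h
    rw [PySem.Dict.getD_of_not_contains wc 0 h]
    simp [h]

-- a fold that normalizes each element and skips the ones failing p equals a fold over the filtered map
theorem pvFold_filter_map {α β σ : Type} (f : α → β) (p : β → Prop) [DecidablePred p]
    (g : σ → β → σ) (l : List α) (init : σ) :
    l.foldl (fun s a => if p (f a) then g s (f a) else s) init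
      = ((l.map f).filter (fun b => decide (p b))).foldl g init := by
  induction l generalizing init with
  | nil => rfl
  | cons a l ih =>
    by_cases h : p (f a)
    · simp [h, ih]
    · simp [h, ih]

-- elements already in the accumulator may be filtered out of the input of a Set-building fold
theorem pvFoldAdd_filter (ws : List String) (acc : PySem.Set String) (x : String)
    (hx : x ∈ acc) :
    ws.foldl PySem.Set.add acc = (ws.filter (fun y => y ≠ x)).foldl PySem.Set.add acc := by
  induction ws generalizing acc with
  | nil => rfl
  | cons a ws ih =>
    by_cases ha : a = x
    · subst ha
      have : PySem.Set.add acc a = acc := by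
        unfold PySem.Set.add
        simp
        exact hx
      simp [this, ih acc hx]
    · have hmem : x ∈ PySem.Set.add acc a := by
        rw [PySem.Set.mem_add]; exact Or.inl hx
      simp [ha, ih _ hmem]

-- a head element absent from the rest of the input and from the accumulator stays in front
theorem pvFoldAdd_cons_acc (l : List String) (w : String) (acc : PySem.Set String)
    (hl : w ∉ l) (hacc : w ∉ acc) :
    l.foldl PySem.Set.add (w :: acc) = w :: l.foldl PySem.Set.add acc := by
  induction l generalizing acc with
  | nil => rfl
  | cons a l ih =>
    have haw : a ≠ w := fun h => hl (h ▸ List.mem_cons_self)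
    have hl' : w ∉ l := fun h => hl (List.mem_cons_of_mem _ h)
    by_cases h : acc.contains a = true
    · have hma : a ∈ acc := List.contains_iff_mem.mp h
      have : PySem.Set.add (w :: acc) a = w :: acc := by
        unfold PySem.Set.add; simp; intro _; exact hma
      have h2 : PySem.Set.add acc a = acc := by
        unfold PySem.Set.add; simp; exact hma
      rw [List.foldl_cons, List.foldl_cons, this, h2, ih acc hl' hacc]
    · have hma : a ∉ acc := fun hm => h (List.contains_iff_mem.mpr hm)
      have : PySem.Set.add (w :: acc) a = w :: (acc ++ [a]) := by
        unfold PySem.Set.add; simp; exact ⟨haw, hma⟩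
      have h2 : PySem.Set.add acc a = acc ++ [a] := by
        unfold PySem.Set.add; simp; exact hma
      have hacc' : w ∉ acc ++ [a] := by
        simp [hacc, (Ne.symm haw)]
      rw [List.foldl_cons, List.foldl_cons, this, h2, ih _ hl' hacc']

-- first-occurrence dedup satisfies the partition recursion
theorem pvOfList_cons (w : String) (ws : List String) :
    PySem.Set.ofList (w :: ws)
      = w :: PySem.Set.ofList (ws.filter (fun x => x ≠ w)) := by
  unfold PySem.Set.ofList
  have h1 : PySem.Set.add PySem.Set.empty w = [w] := rfl
  rw [List.foldl_cons, h1,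
      pvFoldAdd_filter ws [w] w (List.mem_singleton.mpr rfl)]
  have hw : w ∉ ws.filter (fun x => x ≠ w) := by
    simp [List.mem_filter]
  have : ([w] : PySem.Set String) = w :: PySem.Set.empty := rfl
  rw [this, pvFoldAdd_cons_acc _ w PySem.Set.empty hw (by simp [PySem.Set.empty])]

-- count of w plus length of the w-free remainder reassembles the length
theorem pvCount_add_filter (w : String) (l : List String) :
    l.count w + (l.filter (fun x => x ≠ w)).length = l.length := by
  simp only [ne_eq, decide_not]
  induction l with
  | nil => rfl
  | cons a l ih =>
    by_cases h : a = w
    · subst h; simp [List.count_cons_self]; omega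
    · simp [List.count_cons_of_ne h, h]; omega

theorem pvCount_cons_ne (k w : String) (l : List String) (h : k ≠ w) :
    List.count k (w :: l) = List.count k l := by
  simp [Ne.symm h]

-- the partition loop computes Counter(ws) in first-occurrence order
theorem pvGroup_eq_map_count (ws : List String) :
    pvGroup ws = (PySem.Set.ofList ws).map (fun k => (k, (ws.count k : Int))) := by
  induction hn : ws.length using Nat.strong_induction_on generalizing ws with
  | _ n ih =>
    match ws with
    | [] => simp [pvGroup, PySem.Set.ofList, PySem.Set.empty]
    | w :: ws =>
      simp only [pvGroup]
      rw [pvOfList_cons, List.map_cons]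
      have hlen : (ws.filter (fun x => x ≠ w)).length ≤ ws.length :=
        List.length_filter_le _ _
      have hn' : ws.length + 1 = n := by simpa using hn
      congr 1
      · have hcount := pvCount_add_filter w ws
        have h1 : (w :: ws).count w = ws.count w + 1 := List.count_cons_self
        rw [h1]
        simp only [Prod.mk.injEq, true_and]
        push_cast
        omega
      · rw [ih (ws.filter (fun x => x ≠ w)).length (by omega) _ rfl]
        apply List.map_congr_left
        intro k hk
        have hkmem : k ∈ ws.filter (fun x => x ≠ w) :=
          (PySem.Set.mem_ofList _ _).mp hk
        have hkne : k ≠ w := by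
          have := (List.mem_filter.mp hkmem).2; simpa using this
        have hcf : (ws.filter (fun x => x ≠ w)).count k = ws.count k :=
          List.count_filter (by simpa using hkne)
        rw [hcf, pvCount_cons_ne k w ws hkne]

theorem count_unique_words_eq (text : String) :
    count_unique_words text = count_unique_words_alt text := by
  unfold count_unique_words count_unique_words_alt
  simp only [pvStep_eq]
  rw [pvFold_filter_map (fun tok => PySem.Str.stripChars (PySem.Str.lower tok) pvPunct)
      (fun t => t ≠ "")
      (fun (wc : PySem.Dict String Int) t => wc.insert t (wc.getD t 0 + 1))]
  rw [PySem.Dict.foldl_insert_getD_add_one_eq_counter]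
  rw [PySem.Dict.items_counter]
  rw [pvGroup_eq_map_count]

-- ===== VERDICT (by name: the statement is the Claim_ definition above) =====
theorem count_unique_words_spec : Claim_equal_count_unique_words := by
  intro text _
  unfold Spec_count_unique_words
  exact count_unique_words_eq text
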